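-- pv_equiv track=rewrite | github.com/plhosk/wordtracer | scripts/build_dictionary_lookup.py | has_stem_similarity
-- ===== SOURCE A (Python) =====
-- COMMON_SUFFIXES = (
--     "iest",
--     "ing",
--     "ier",
--     "est",
--     "ers",
--     "er",
--     "ed",
--     "es",
--     "s",
-- )
--
-- def simplified_forms(word: str) -> set[str]:
--     forms = {word}
--     current = word
--     while True:
--         stripped = None
--         for suffix in COMMON_SUFFIXES:
--             if current.endswith(suffix) and len(current) - len(suffix) >= 3:
--                 stripped = current[: -len(suffix)]
--                 break
--         if not stripped:
--             break
--         if stripped in forms: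
--             break
--         forms.add(stripped)
--         current = stripped
--     return forms
--
-- def common_prefix_len(a: str, b: str) -> int:
--     max_len = min(len(a), len(b))
--     idx = 0
--     while idx < max_len and a[idx] == b[idx]:
--         idx += 1
--     return idx
--
-- def longest_common_subsequence_len(a: str, b: str) -> int:
--     if not a or not b:
--         return 0
--     rows = len(a) + 1
--     cols = len(b) + 1
--     dp = [[0] * cols for _ in range(rows)]
--     for i in range(1, rows):
--         for j in range(1, cols):
--             if a[i - 1] == b[j - 1]:
--                 dp[i][j] = dp[i - 1][j - 1] + 1
--             else:
--                 dp[i][j] = max(dp[i - 1][j], dp[i][j - 1])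
--     return dp[-1][-1]
--
-- def has_stem_similarity(canonical: str, candidate: str) -> bool:
--     for left in simplified_forms(canonical):
--         for right in simplified_forms(candidate):
--             if common_prefix_len(left, right) >= 3:
--                 return True
--             if longest_common_subsequence_len(left, right) >= 3:
--                 return True
--     return False
-- ===== SOURCE B (Python) =====
-- COMMON_SUFFIXES = (
--     "iest",
--     "ing",
--     "ier",
--     "est",
--     "ers",
--     "er",
--     "ed",
--     "es",
--     "s",
-- )
--
-- def simplified_forms(word: str) -> set[str]:
--     forms = {word}
--     current = word
--     while True:
--         stripped = None
--         for suffix in COMMON_SUFFIXES: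
--             if current.endswith(suffix) and len(current) - len(suffix) >= 3:
--                 stripped = current[: -len(suffix)]
--                 break
--         if not stripped:
--             break
--         if stripped in forms:
--             break
--         forms.add(stripped)
--         current = stripped
--     return forms
--
-- def _advance(b, p, ch):
--     """Fewest leading chars of b ending in a ch that lies at or past position p; None if no such ch."""
--     if p is None:
--         return None
--     t = b.find(ch, p)
--     return None if t == -1 else t + 1
--
-- def _pmin(x, y):
--     if x is None:
--         return y
--     if y is None:
--         return x
--     return min(x, y)
--
-- def _shares_len3_subsequence(a, b):
--     # Greedy minimal-witness scan (subsequence-automaton style, no DP table):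
--     # after reading a prefix of a, pk is the fewest leading chars of b that
--     # contain a length-k common subsequence with that prefix (None = none yet).
--     p1 = p2 = p3 = None
--     for ch in a:
--         p1, p2, p3 = (_pmin(p1, _advance(b, 0, ch)),
--                       _pmin(p2, _advance(b, p1, ch)),
--                       _pmin(p3, _advance(b, p2, ch)))
--     return p3 is not None
--
-- def has_stem_similarity(canonical: str, candidate: str) -> bool:
--     rights = simplified_forms(candidate)
--     for left in simplified_forms(canonical):
--         for right in rights:
--             if _shares_len3_subsequence(left, right):
--                 return True
--     return False
-- ===== Notes on version B (the rewrite author's own statement) =====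
-- stated objective: faster
-- what changed: Replaces the full (n+1)x(m+1) LCS dynamic-programming table (and the separate common-prefix helper, subsumed since a length-3 common prefix is a length-3 common subsequence) with a greedy minimal-witness scan: while reading each stem once, three pointers record the fewest leading characters of the other stem containing a common subsequence of length 1, 2 and 3, advanced by C-level first-occurrence search (str.find).
import Mathlib
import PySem

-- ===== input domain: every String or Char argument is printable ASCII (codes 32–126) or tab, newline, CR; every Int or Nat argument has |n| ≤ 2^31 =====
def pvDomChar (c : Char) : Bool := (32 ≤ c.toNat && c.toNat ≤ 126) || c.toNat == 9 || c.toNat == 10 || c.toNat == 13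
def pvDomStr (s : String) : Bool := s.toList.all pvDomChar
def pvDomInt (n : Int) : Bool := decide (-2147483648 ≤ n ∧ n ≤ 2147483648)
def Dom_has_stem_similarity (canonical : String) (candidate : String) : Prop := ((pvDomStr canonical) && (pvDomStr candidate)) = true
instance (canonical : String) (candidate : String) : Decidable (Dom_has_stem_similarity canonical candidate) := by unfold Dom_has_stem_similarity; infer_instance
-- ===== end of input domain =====

-- B replaces A's quadratic LCS table (and the common-prefix shortcut, subsumed by it) with a
-- greedy minimal-witness scan: three pointers into the candidate string, each the fewest leading
-- chars containing a length-1/2/3 common subsequence, advanced by first-occurrence search.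

-- ===== PORT A =====
-- COMMON_SUFFIXES and simplified_forms are textually identical in A and in B: ported once, shared.
def COMMON_SUFFIXES : List (List Char) :=
  [['i','e','s','t'], ['i','n','g'], ['i','e','r'], ['e','s','t'], ['e','r','s'],
   ['e','r'], ['e','d'], ['e','s'], ['s']]

-- the 'for suffix in COMMON_SUFFIXES: … break' scan inside simplified_forms
def pvFindStrip (current : List Char) : Option (List Char) :=
  match COMMON_SUFFIXES.find? (fun suffix =>
      PySem.Chars.endswith current suffix && decide (3 ≤ (current.length : Int) - suffix.length)) with
  | some suffix => some (PySem.List.slice current none (some (-(suffix.length : Int))))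
  | none => none

-- termination fact for the while-loop below (the stripped form is strictly shorter)
lemma pvFindStrip_shorter {current stripped : List Char} (h : pvFindStrip current = some stripped) :
    stripped.length < current.length := by
  unfold pvFindStrip at h
  cases hf : COMMON_SUFFIXES.find? (fun suffix =>
      PySem.Chars.endswith current suffix && decide (3 ≤ (current.length : Int) - suffix.length)) with
  | none => rw [hf] at h; simp at h
  | some suffix =>
    rw [hf] at h
    have hp := List.find?_some hf
    have hmem := List.mem_of_find?_eq_some hf
    simp only [Bool.and_eq_true, decide_eq_true_eq] at hp
    have hpos : 0 < suffix.length := by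
      fin_cases hmem <;> simp
    have hle : suffix.length ≤ current.length := by
      have := (PySem.Chars.endswith_iff _ _).mp hp.1
      exact List.IsSuffix.length_le this
    simp only [Option.some.injEq] at h
    subst h
    rw [show PySem.List.slice current none (some (-(suffix.length : Int)))
        = current.take (current.length - suffix.length) by
      simp [PySem.List.slice, PySem.List.clampIdx_neg_natCast _ _ hpos]]
    rw [List.length_take]
    omega

def pvSimplifyLoop (forms : PySem.Set (List Char)) (current : List Char) : PySem.Set (List Char) :=
  match h : pvFindStrip current with
  | none => forms
  | some stripped =>
      if PySem.Set.contains forms stripped then forms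
      else pvSimplifyLoop (PySem.Set.add forms stripped) stripped
  termination_by current.length
  decreasing_by exact pvFindStrip_shorter h

def simplified_forms (word : List Char) : PySem.Set (List Char) :=
  pvSimplifyLoop (PySem.Set.ofList [word]) word

def common_prefix_loop (a b : List Char) (maxLen : Nat) (idx : Nat) : Nat :=
  if h : idx < maxLen ∧ PySem.List.pyGetD a (idx : Int) ' ' = PySem.List.pyGetD b (idx : Int) ' '
  then common_prefix_loop a b maxLen (idx + 1)
  else idx
  termination_by maxLen - idx
  decreasing_by omega

def common_prefix_len (a b : List Char) : Int :=
  (common_prefix_loop a b (min a.length b.length) 0 : Int)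

-- body of the nested 'for i … for j …' loops of A's LCS table
def pvDpStep (a b : List Char) (i : Int) (dp : List (List Int)) (j : Int) : List (List Int) :=
  if PySem.List.pyGetD a (i - 1) ' ' == PySem.List.pyGetD b (j - 1) ' ' then
    PySem.List.pySetD dp i (PySem.List.pySetD (PySem.List.pyGetD dp i []) j
      (PySem.List.pyGetD (PySem.List.pyGetD dp (i - 1) []) (j - 1) 0 + 1))
  else
    PySem.List.pySetD dp i (PySem.List.pySetD (PySem.List.pyGetD dp i []) j
      (max (PySem.List.pyGetD (PySem.List.pyGetD dp (i - 1) []) j 0)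
           (PySem.List.pyGetD (PySem.List.pyGetD dp i []) (j - 1) 0)))

def longest_common_subsequence_len (a b : List Char) : Int :=
  if a.isEmpty || b.isEmpty then 0
  else
    let rows : Int := (a.length : Int) + 1
    let cols : Int := (b.length : Int) + 1
    let dp0 : List (List Int) := (PySem.List.pyRange 0 rows 1).map (fun _ => List.replicate cols.toNat 0)
    let dp := (PySem.List.pyRange 1 rows 1).foldl (fun dp' i =>
        (PySem.List.pyRange 1 cols 1).foldl (fun dp'' j => pvDpStep a b i dp'' j) dp') dp0
    PySem.List.pyGetD (PySem.List.pyGetD dp (-1) []) (-1) 0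

def has_stem_similarity (canonical : String) (candidate : String) : Bool :=
  (simplified_forms canonical.toList).any fun left =>
    (simplified_forms candidate.toList).any fun right =>
      decide ((3:Int) ≤ common_prefix_len left right) ||
      decide ((3:Int) ≤ longest_common_subsequence_len left right)

-- ===== PORT B =====
-- _advance(b, p, ch): b.find(ch, p) ported with PySem.Chars.findFrom; None = Option.none
def pvAdvance (b : List Char) (p : Option Nat) (ch : Char) : Option Nat :=
  match p with
  | none => none
  | some p =>
    let t := PySem.Chars.findFrom b [ch] (p : Int) none
    if t = -1 then none else some (t.toNat + 1)

-- _pmin(x, y): min with None acting as infinity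
def pvPMin : Option Nat → Option Nat → Option Nat
  | none, y => y
  | some x, none => some x
  | some x, some y => some (min x y)

-- body of the 'for ch in a' loop of _shares_len3_subsequence: simultaneous tuple update
def pvStepFn (b : List Char) (st : Option Nat × Option Nat × Option Nat) (ch : Char) :
    Option Nat × Option Nat × Option Nat :=
  (pvPMin st.1 (pvAdvance b (some 0) ch),
   pvPMin st.2.1 (pvAdvance b st.1 ch),
   pvPMin st.2.2 (pvAdvance b st.2.1 ch))

def pvShares3 (a b : List Char) : Bool :=
  let st := a.foldl (pvStepFn b) (none, none, none)
  st.2.2.isSome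

def has_stem_similarity_alt (canonical : String) (candidate : String) : Bool :=
  let rights := simplified_forms candidate.toList
  (simplified_forms canonical.toList).any fun left =>
    rights.any fun right => pvShares3 left right

-- ===== PRECONDITION & SPEC =====
def Spec_has_stem_similarity (canonical : String) (candidate : String) (out : Bool) : Prop := out = has_stem_similarity_alt canonical candidate
instance (canonical : String) (candidate : String) (out : Bool) : Decidable (Spec_has_stem_similarity canonical candidate out) := by unfold Spec_has_stem_similarity; infer_instance

-- ===== CLAIM (what is proved, stated in full; the proofs are below) =====
def Claim_equal_has_stem_similarity : Prop := ∀ (canonical : String) (candidate : String), Dom_has_stem_similarity canonical candidate → Spec_has_stem_similarity canonical candidate (has_stem_similarity canonical candidate)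

-- ===== LEMMAS AND PROOFS =====
lemma pv_set_self {α : Type} (l : List α) (i : Nat) (v : α) (h : l[i]? = some v) :
    l.set i v = l := by
  obtain ⟨hi, hv⟩ := List.getElem?_eq_some_iff.mp h
  apply List.ext_getElem?
  intro n
  by_cases hn : n = i
  · subst hn; simp [List.getElem?_set_self hi, hv, List.getElem?_eq_getElem hi]
  · simp [List.getElem?_set_ne (by omega : i ≠ n)]
-- getter helpers
lemma pv_getD_set_self {α : Type} (l : List α) (i : Nat) (v d : α) (h : i < l.length) :
    (l.set i v).getD i d = v := by
  simp [List.getD, List.getElem?_set_self h]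
lemma pv_getD_set_ne {α : Type} (l : List α) (i u : Nat) (v d : α) (h : i ≠ u) :
    (l.set i v).getD u d = l.getD u d := by
  simp [List.getD, List.getElem?_set_ne h]
lemma pv_getD_map_range {α : Type} (f : Nat → α) (n u : Nat) (d : α) (h : u < n) :
    ((List.range n).map f).getD u d = f u := by
  simp [List.getD, h]
lemma pv_pySetD_natCast {α : Type} (xs : List α) (n : Nat) (v : α) (h : n < xs.length) :
    PySem.List.pySetD xs (n : Int) v = xs.set n v := by
  simp [PySem.List.pySetD, PySem.List.pySet?_natCast xs n v h]
def pvLS (a b : List Char) : Nat → Nat → Nat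
  | 0, _ => 0
  | _ + 1, 0 => 0
  | i + 1, j + 1 =>
    if a.getD i ' ' = b.getD j ' ' then pvLS a b i j + 1
    else max (pvLS a b i (j + 1)) (pvLS a b (i + 1) j)
  termination_by i j => i + j
lemma pvLS_zero_right (a b : List Char) (i : Nat) : pvLS a b i 0 = 0 := by
  cases i <;> simp [pvLS]
lemma pvLS_succ_succ (a b : List Char) (i j : Nat) :
    pvLS a b (i+1) (j+1) = if a.getD i ' ' = b.getD j ' ' then pvLS a b i j + 1
      else max (pvLS a b i (j+1)) (pvLS a b (i+1) j) := by
  rw [pvLS]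
lemma pvLS_bounds (a b : List Char) : ∀ (n i j : Nat), i + j ≤ n →
    pvLS a b i j ≤ pvLS a b (i+1) j ∧ pvLS a b i j ≤ pvLS a b i (j+1) ∧
    pvLS a b (i+1) j ≤ pvLS a b i j + 1 ∧ pvLS a b i (j+1) ≤ pvLS a b i j + 1 := by
  intro n
  induction n with
  | zero =>
    intro i j h
    obtain ⟨rfl, rfl⟩ : i = 0 ∧ j = 0 := by omega
    simp [pvLS, pvLS_zero_right]
  | succ n ih =>
    intro i j h
    by_cases hn : i + j ≤ n
    · exact ih i j hn
    refine ⟨?_, ?_, ?_, ?_⟩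
    · cases j with
      | zero => simp [pvLS_zero_right]
      | succ j' =>
        rw [pvLS_succ_succ]
        split
        · have := (ih i j' (by omega)).2.2.2
          omega
        · exact le_trans (le_max_left _ _) (le_refl _)
    · cases i with
      | zero => simp [pvLS]
      | succ i' =>
        rw [pvLS_succ_succ]
        split
        · have := (ih i' j (by omega)).2.2.1
          omega
        · exact le_max_right _ _
    · cases j with
      | zero => simp [pvLS_zero_right]
      | succ j' =>
        rw [pvLS_succ_succ]
        split
        · have := (ih i j' (by omega)).2.1
          omega
        · have h2 : pvLS a b (i+1) j' ≤ pvLS a b i j' + 1 := (ih i j' (by omega)).2.2.1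
          have h3 : pvLS a b i j' ≤ pvLS a b i (j'+1) := (ih i j' (by omega)).2.1
          simp only [max_le_iff]
          omega
    · cases i with
      | zero => simp [pvLS]
      | succ i' =>
        rw [pvLS_succ_succ]
        split
        · have := (ih i' j (by omega)).1
          omega
        · have h2 : pvLS a b i' (j+1) ≤ pvLS a b i' j + 1 := (ih i' j (by omega)).2.2.2
          have h3 : pvLS a b i' j ≤ pvLS a b (i'+1) j := (ih i' j (by omega)).1
          simp only [max_le_iff]
          omega
lemma pvLS_mono (a b : List Char) {i j i' j' : Nat} (h1 : i ≤ i') (h2 : j ≤ j') :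
    pvLS a b i j ≤ pvLS a b i' j' := by
  have step1 : ∀ d u v : Nat, pvLS a b u v ≤ pvLS a b (u+d) v := by
    intro d
    induction d with
    | zero => intro u v; rfl
    | succ m ihm =>
      intro u v
      exact le_trans (ihm u v) (pvLS_bounds a b (u+m+v) (u+m) v le_rfl).1
  have step2 : ∀ d u v : Nat, pvLS a b u v ≤ pvLS a b u (v+d) := by
    intro d
    induction d with
    | zero => intro u v; rfl
    | succ m ihm =>
      intro u v
      exact le_trans (ihm u v) (pvLS_bounds a b (u+(v+m)) u (v+m) le_rfl).2.1
  calc pvLS a b i j ≤ pvLS a b (i + (i' - i)) j := step1 _ i j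
    _ = pvLS a b i' j := by rw [Nat.add_sub_cancel' h1]
    _ ≤ pvLS a b i' (j + (j' - j)) := step2 _ i' j
    _ = pvLS a b i' j' := by rw [Nat.add_sub_cancel' h2]
lemma pvLS_diag (a b : List Char) (c : Nat) (h : ∀ k < c, a.getD k ' ' = b.getD k ' ') :
    c ≤ pvLS a b c c := by
  induction c with
  | zero => simp
  | succ m ihm =>
    rw [pvLS_succ_succ, if_pos (h m (by omega))]
    have := ihm (fun k hk => h k (by omega))
    omega
lemma common_prefix_loop_spec (a b : List Char) (maxLen idx : Nat) :
    (idx ≤ maxLen → common_prefix_loop a b maxLen idx ≤ maxLen) ∧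
    (∀ k, idx ≤ k → k < common_prefix_loop a b maxLen idx → a.getD k ' ' = b.getD k ' ') := by
  fun_induction common_prefix_loop a b maxLen idx with
  | case1 idx h ih =>
    obtain ⟨ihm, ihc⟩ := ih
    refine ⟨fun _ => ihm (by omega), ?_⟩
    intro k hk1 hk2
    rcases Nat.eq_or_lt_of_le hk1 with rfl | hlt
    · simpa using h.2
    · exact ihc k (by omega) hk2
  | case2 idx h =>
    exact ⟨fun hh => le_rfl.trans hh, fun k hk1 hk2 => absurd hk2 (by omega)⟩
def pvRowA (a b : List Char) (i : Nat) : List Int :=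
  (List.range (b.length + 1)).map fun j => (pvLS a b i j : Int)
def pvPartRow (a b : List Char) (i k : Nat) : List Int :=
  (List.range (b.length + 1)).map fun j => if j ≤ k then (pvLS a b i j : Int) else 0
def pvDpState (a b : List Char) (t : Nat) : List (List Int) :=
  (List.range (a.length + 1)).map fun i => if i ≤ t then pvRowA a b i else List.replicate (b.length + 1) 0

lemma pvPartRow_zero (a b : List Char) (i : Nat) :
    pvPartRow a b i 0 = List.replicate (b.length + 1) 0 := by
  apply List.ext_getElem
  · simp [pvPartRow]
  intro u h1 h2
  simp only [pvPartRow, List.getElem_map, List.getElem_range, List.getElem_replicate]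
  rcases Nat.eq_zero_or_pos u with rfl | hu
  · simp [pvLS_zero_right]
  · simp only [Nat.le_zero]
    rw [if_neg (by omega : ¬ u = 0)]
lemma pvPartRow_full (a b : List Char) (i : Nat) :
    pvPartRow a b i b.length = pvRowA a b i := by
  apply List.ext_getElem
  · simp [pvPartRow, pvRowA]
  intro u h1 h2
  simp only [pvPartRow, pvRowA, List.getElem_map, List.getElem_range]
  have : u ≤ b.length := by simp [pvPartRow] at h1; omega
  simp [this]
lemma pvPartRow_set_succ (a b : List Char) (i k : Nat) (h : k + 1 ≤ b.length) :
    (pvPartRow a b i k).set (k+1) ((pvLS a b i (k+1) : Int)) = pvPartRow a b i (k+1) := by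
  apply List.ext_getElem
  · simp [pvPartRow]
  intro u h1 h2
  simp only [pvPartRow, List.length_map, List.length_range] at h2
  rw [List.getElem_set]
  simp only [pvPartRow, List.getElem_map, List.getElem_range]
  by_cases hu : k + 1 = u
  · rw [if_pos hu, if_pos (by omega : u ≤ k + 1), hu]
  · rw [if_neg hu]
    by_cases hle : u ≤ k
    · rw [if_pos hle, if_pos (by omega : u ≤ k + 1)]
    · rw [if_neg hle, if_neg (by omega : ¬ u ≤ k + 1)]
lemma pvDpState_length (a b : List Char) (t : Nat) : (pvDpState a b t).length = a.length + 1 := by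
  simp [pvDpState]
lemma pvDpState_getD (a b : List Char) (t u : Nat) (h : u ≤ a.length) :
    (pvDpState a b t).getD u [] = if u ≤ t then pvRowA a b u else List.replicate (b.length + 1) 0 := by
  simp only [pvDpState]
  rw [pv_getD_map_range _ _ _ _ (by omega : u < a.length + 1)]
lemma pvRowA_getD (a b : List Char) (i u : Nat) (h : u ≤ b.length) :
    (pvRowA a b i).getD u 0 = (pvLS a b i u : Int) := by
  simp only [pvRowA]
  rw [pv_getD_map_range _ _ _ _ (by omega : u < b.length + 1)]
lemma pvPartRow_getD (a b : List Char) (i k u : Nat) (h : u ≤ b.length) :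
    (pvPartRow a b i k).getD u 0 = if u ≤ k then (pvLS a b i u : Int) else 0 := by
  simp only [pvPartRow]
  rw [pv_getD_map_range _ _ _ _ (by omega : u < b.length + 1)]
lemma pvInnerA (a b : List Char) (t : Nat) (ht : t < a.length) (k : Nat) (hk : k ≤ b.length) :
    (PySem.List.pyRange 1 ((k : Int) + 1) 1).foldl (pvDpStep a b ((t+1 : Nat) : Int)) (pvDpState a b t)
      = (pvDpState a b t).set (t+1) (pvPartRow a b (t+1) k) := by
  induction k with
  | zero =>
    rw [show ((0:Nat):Int) + 1 = 1 by norm_num, PySem.List.pyRange_one_eq_nil le_rfl]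
    simp only [List.foldl_nil]
    rw [pvPartRow_zero]
    refine (pv_set_self _ _ _ ?_).symm
    have hlen : t+1 < (pvDpState a b t).length := by rw [pvDpState_length]; omega
    rw [List.getElem?_eq_getElem hlen]
    have hD := pvDpState_getD a b t (t+1) (by omega)
    rw [if_neg (by omega)] at hD
    rw [← hD]
    simp [List.getD, List.getElem?_eq_getElem hlen]
  | succ k ih =>
    have hk' : k ≤ b.length := by omega
    have hsplit : PySem.List.pyRange 1 (((k+1:Nat):Int) + 1) 1
        = PySem.List.pyRange 1 ((k:Int)+1) 1 ++ [(k:Int)+1] := by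
      push_cast
      exact PySem.List.pyRange_one_succ_right (by omega)
    rw [hsplit, List.foldl_append, ih hk']
    simp only [List.foldl_cons, List.foldl_nil]
    -- now evaluate one pvDpStep
    set S := pvDpState a b t with hS
    set P := pvPartRow a b (t+1) k with hP
    have hSlen : S.length = a.length + 1 := pvDpState_length a b t
    have hset_len : (S.set (t+1) P).length = a.length + 1 := by simp [hSlen]
    have e1 : ((t+1:Nat):Int) - 1 = ((t:Nat):Int) := by push_cast; ring
    have e2 : ((k:Int)+1) - 1 = ((k:Nat):Int) := by ring
    have e3 : ((k:Int)+1) = ((k+1:Nat):Int) := by push_cast; ring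
    have getRowCur : PySem.List.pyGetD (S.set (t+1) P) ((t+1:Nat):Int) [] = P := by
      rw [PySem.List.pyGetD_natCast, pv_getD_set_self _ _ _ _ (by omega)]
    have getRowPrev : PySem.List.pyGetD (S.set (t+1) P) ((t:Nat):Int) [] = pvRowA a b t := by
      rw [PySem.List.pyGetD_natCast, pv_getD_set_ne _ _ _ _ _ (by omega)]
      rw [pvDpState_getD a b t t (by omega), if_pos le_rfl]
    have getPk : PySem.List.pyGetD P ((k:Nat):Int) 0 = if k ≤ k then ((pvLS a b (t+1) k : Nat) : Int) else 0 := by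
      rw [PySem.List.pyGetD_natCast, hP, pvPartRow_getD a b (t+1) k k hk']
    have getPrevK1 : PySem.List.pyGetD (pvRowA a b t) ((k:Int)+1) 0 = (pvLS a b t (k+1) : Int) := by
      rw [e3, PySem.List.pyGetD_natCast, pvRowA_getD a b t (k+1) (by omega)]
    have getPrevK : PySem.List.pyGetD (pvRowA a b t) ((k:Nat):Int) 0 = (pvLS a b t k : Int) := by
      rw [PySem.List.pyGetD_natCast, pvRowA_getD a b t k (by omega)]
    have chA : PySem.List.pyGetD a ((t:Nat):Int) ' ' = a.getD t ' ' := PySem.List.pyGetD_natCast a t ' '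
    have chB : PySem.List.pyGetD b ((k:Nat):Int) ' ' = b.getD k ' ' := PySem.List.pyGetD_natCast b k ' '
    have setP : ∀ v : Int, PySem.List.pySetD P ((k:Int)+1) v = P.set (k+1) v := by
      intro v
      rw [e3, pv_pySetD_natCast _ _ _ (by simp [hP, pvPartRow]; omega)]
    have setS : ∀ w : List Int, PySem.List.pySetD (S.set (t+1) P) ((t+1:Nat):Int) w
        = S.set (t+1) w := by
      intro w
      rw [pv_pySetD_natCast _ _ _ (by omega), List.set_set]
    unfold pvDpStep
    rw [e1, e2, getRowCur, getRowPrev, chA, chB]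
    by_cases hc : a.getD t ' ' = b.getD k ' '
    · rw [if_pos (by simpa using hc)]
      rw [getPrevK, setP, setS]
      rw [show (pvLS a b t k : Int) + 1 = ((pvLS a b (t+1) (k+1) : Nat) : Int) by
        rw [pvLS_succ_succ, if_pos hc]; push_cast; ring]
      rw [pvPartRow_set_succ a b (t+1) k (by omega)]
    · rw [if_neg (by simpa using hc)]
      rw [getPrevK1, getPk, if_pos le_rfl, setP, setS]
      rw [show max ((pvLS a b t (k+1) : Nat) : Int) ((pvLS a b (t+1) k : Nat) : Int)
            = ((pvLS a b (t+1) (k+1) : Nat) : Int) by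
        rw [pvLS_succ_succ a b t k, if_neg hc]; push_cast [Nat.cast_max]; ring]
      rw [pvPartRow_set_succ a b (t+1) k (by omega)]
lemma pvRowA_zero (a b : List Char) : pvRowA a b 0 = List.replicate (b.length + 1) 0 := by
  apply List.ext_getElem
  · simp [pvRowA]
  intro u h1 h2
  simp [pvRowA, pvLS]
lemma pvDpState_set_succ (a b : List Char) (t : Nat) (h : t + 1 ≤ a.length) :
    (pvDpState a b t).set (t+1) (pvRowA a b (t+1)) = pvDpState a b (t+1) := by
  apply List.ext_getElem
  · simp [pvDpState]
  intro u h1 h2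
  simp only [pvDpState, List.length_map, List.length_range] at h2
  rw [List.getElem_set]
  simp only [pvDpState, List.getElem_map, List.getElem_range]
  by_cases hu : t + 1 = u
  · rw [if_pos hu, if_pos (by omega : u ≤ t + 1), hu]
  · rw [if_neg hu]
    by_cases hle : u ≤ t
    · rw [if_pos hle, if_pos (by omega : u ≤ t + 1)]
    · rw [if_neg hle, if_neg (by omega : ¬ u ≤ t + 1)]
lemma pvOuterA (a b : List Char) (t : Nat) (ht : t ≤ a.length) :
    (PySem.List.pyRange 1 ((t:Int)+1) 1).foldl (fun dp' i =>
        (PySem.List.pyRange 1 ((b.length:Int)+1) 1).foldl (fun dp'' j => pvDpStep a b i dp'' j) dp')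
      (pvDpState a b 0) = pvDpState a b t := by
  induction t with
  | zero =>
    rw [show ((0:Nat):Int) + 1 = 1 by norm_num, PySem.List.pyRange_one_eq_nil le_rfl]
    rfl
  | succ t ih =>
    have hsplit : PySem.List.pyRange 1 (((t+1:Nat):Int) + 1) 1
        = PySem.List.pyRange 1 ((t:Int)+1) 1 ++ [(t:Int)+1] := by
      push_cast
      exact PySem.List.pyRange_one_succ_right (by omega)
    rw [hsplit, List.foldl_append, ih (by omega)]
    simp only [List.foldl_cons, List.foldl_nil]
    rw [show (t:Int)+1 = ((t+1:Nat):Int) by push_cast; ring]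
    have hin := pvInnerA a b t (by omega) b.length le_rfl
    rw [show ((b.length:Nat):Int) + 1 = (b.length:Int) + 1 by norm_num] at hin
    rw [hin, pvPartRow_full, pvDpState_set_succ a b t (by omega)]
lemma pvDpState_getElem (a b : List Char) (t u : Nat) (h : u < a.length + 1) :
    (pvDpState a b t)[u]'(by rw [pvDpState_length]; omega)
      = if u ≤ t then pvRowA a b u else List.replicate (b.length + 1) 0 := by
  simp [pvDpState]
lemma pvDpState_zero_eq_dp0 (a b : List Char) :
    (PySem.List.pyRange 0 ((a.length : Int) + 1) 1).map (fun _ => List.replicate ((b.length : Int) + 1).toNat (0:Int))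
      = pvDpState a b 0 := by
  have hc : ((b.length : Int) + 1).toNat = b.length + 1 := by omega
  rw [hc]
  apply List.ext_getElem
  · simp only [List.length_map, PySem.List.length_pyRange_one, pvDpState, List.length_range]
    omega
  intro u h1 h2
  simp only [List.getElem_map, pvDpState, List.getElem_range]
  by_cases hu : u ≤ 0
  · rw [if_pos hu, show u = 0 by omega, pvRowA_zero]
  · rw [if_neg hu]
lemma lcsA_eq (a b : List Char) :
    longest_common_subsequence_len a b = (pvLS a b a.length b.length : Int) := by
  unfold longest_common_subsequence_len
  by_cases he : a.isEmpty || b.isEmpty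
  · rw [if_pos he]
    rcases Bool.or_eq_true_iff.mp he with h | h
    · rw [List.isEmpty_iff.mp h]
      simp [pvLS]
    · rw [List.isEmpty_iff.mp h]
      simp [pvLS_zero_right]
  · rw [if_neg he]
    simp only []
    rw [show (PySem.List.pyRange 0 ((a.length : Int) + 1) 1).map (fun _ => List.replicate ((b.length : Int) + 1).toNat (0:Int)) = pvDpState a b 0 from pvDpState_zero_eq_dp0 a b]
    rw [pvOuterA a b a.length le_rfl]
    have hne : pvDpState a b a.length ≠ [] := by
      intro hx
      have := pvDpState_length a b a.length
      rw [hx] at this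
      simp at this
    rw [PySem.List.pyGetD_neg_one _ _ hne]
    have hlast : (pvDpState a b a.length).getLast hne = pvRowA a b a.length := by
      rw [List.getLast_eq_getElem]
      simp only [pvDpState_length, Nat.add_sub_cancel]
      rw [pvDpState_getElem a b a.length a.length (by omega), if_pos le_rfl]
    rw [hlast]
    have hrne : pvRowA a b a.length ≠ [] := by
      simp [pvRowA]
    rw [PySem.List.pyGetD_neg_one _ _ hrne]
    rw [List.getLast_eq_getElem]
    simp only [pvRowA, List.length_map, List.length_range, Nat.add_sub_cancel,
      List.getElem_map, List.getElem_range]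

-- ===== B-side lemmas: the greedy minimal-witness invariant =====
lemma pv_single_prefix_drop (b : List Char) (c : Char) (v : Nat) :
    [c] <+: b.drop v ↔ v < b.length ∧ b.getD v ' ' = c := by
  constructor
  · rintro ⟨t, ht⟩
    have hv : v < b.length := by
      by_contra hle
      rw [List.drop_eq_nil_iff.mpr (by omega)] at ht
      simp at ht
    have hh : (b.drop v).head? = some c := by rw [← ht]; simp
    rw [List.head?_drop, List.getElem?_eq_getElem hv] at hh
    refine ⟨hv, ?_⟩
    rw [List.getD_eq_getElem?_getD, List.getElem?_eq_getElem hv]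
    simp only [Option.getD_some]
    simpa using hh
  · rintro ⟨hv, hc⟩
    rw [List.getD_eq_getElem?_getD, List.getElem?_eq_getElem hv] at hc
    simp only [Option.getD_some] at hc
    refine ⟨b.drop (v+1), ?_⟩
    rw [List.drop_eq_getElem_cons hv]
    simp [hc]
lemma pv_single_infix (c : Char) (l : List Char) : [c] <:+: l ↔ c ∈ l := by
  constructor
  · intro h
    exact h.subset (by simp)
  · intro h
    obtain ⟨l1, l2, rfl⟩ := List.append_of_mem h
    exact ⟨l1, l2, by simp⟩
lemma pv_mem_drop_iff (b : List Char) (c : Char) (p : Nat) :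
    c ∈ b.drop p ↔ ∃ v, p ≤ v ∧ v < b.length ∧ b.getD v ' ' = c := by
  constructor
  · intro hm
    obtain ⟨i, hi, hc⟩ := List.mem_iff_getElem.mp hm
    have hi' : p + i < b.length := by
      have h2 := hi
      rw [List.length_drop] at h2
      omega
    refine ⟨p + i, by omega, hi', ?_⟩
    have hsome : b[p + i]? = some c := by
      rw [← List.getElem?_drop, List.getElem?_eq_getElem hi, hc]
    rw [List.getD_eq_getElem?_getD, hsome]
    rfl
  · rintro ⟨v, hpv, hv, hc⟩
    rw [List.getD_eq_getElem?_getD, List.getElem?_eq_getElem hv] at hc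
    simp only [Option.getD_some] at hc
    have hm : (b.drop p)[v - p]? = some c := by
      rw [List.getElem?_drop, show p + (v - p) = v by omega, List.getElem?_eq_getElem hv, hc]
    exact List.mem_of_getElem? hm
lemma pvAdvance_some (b : List Char) (ch : Char) (p t : Nat) (hp : p ≤ b.length)
    (h : pvAdvance b (some p) ch = some t) :
    ∃ u, t = u + 1 ∧ p ≤ u ∧ u < b.length ∧ b.getD u ' ' = ch ∧
      ∀ v, p ≤ v → v < u → b.getD v ' ' ≠ ch := by
  unfold pvAdvance at h
  simp only at h
  by_cases hne : PySem.Chars.findFrom b [ch] (p : Int) none = -1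
  · rw [if_pos hne] at h; simp at h
  · rw [if_neg hne] at h
    simp only [Option.some.injEq] at h
    obtain ⟨h1, h2, h3⟩ := PySem.Chars.findFrom_natCast_spec b [ch] p hp hne
    set f := PySem.Chars.findFrom b [ch] (p : Int) none with hf
    have hpref := (pv_single_prefix_drop b ch f.toNat).mp h2
    refine ⟨f.toNat, h.symm, by omega, hpref.1, hpref.2, ?_⟩
    intro v hv1 hv2 hc
    exact h3 v (by exact_mod_cast hv1) hv2 ((pv_single_prefix_drop b ch v).mpr ⟨by omega, hc⟩)
lemma pvAdvance_none (b : List Char) (ch : Char) (p : Nat) (hp : p ≤ b.length)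
    (h : pvAdvance b (some p) ch = none) :
    ∀ v, p ≤ v → v < b.length → b.getD v ' ' ≠ ch := by
  unfold pvAdvance at h
  simp only at h
  by_cases hne : PySem.Chars.findFrom b [ch] (p : Int) none = -1
  · have := (PySem.Chars.findFrom_natCast_eq_neg_one_iff b [ch] p hp).mp hne
    intro v hv1 hv2 hc
    exact this ((pv_single_infix ch (b.drop p)).mpr
      ((pv_mem_drop_iff b ch p).mpr ⟨v, hv1, hv2, hc⟩))
  · rw [if_neg hne] at h; simp at h
-- the "increase" lemma: a jump in the LCS of prefixes when one char of a is added comes from a match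
lemma pvLS_incr (a b : List Char) (i k : Nat) : ∀ j, k + 1 ≤ pvLS a b (i+1) j →
    pvLS a b i j ≤ k → ∃ t, t < j ∧ b.getD t ' ' = a.getD i ' ' ∧ k ≤ pvLS a b i t := by
  intro j
  induction j with
  | zero => intro h1 _; rw [pvLS_zero_right] at h1; omega
  | succ j ih =>
    intro h1 h2
    rw [pvLS_succ_succ] at h1
    by_cases hc : a.getD i ' ' = b.getD j ' '
    · rw [if_pos hc] at h1
      exact ⟨j, by omega, hc.symm, by omega⟩
    · rw [if_neg hc] at h1
      have hm1 : pvLS a b i j ≤ pvLS a b i (j+1) := pvLS_mono a b le_rfl (by omega)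
      have h1' : k + 1 ≤ pvLS a b (i+1) j := by
        rcases max_le_iff.mp (le_refl (max (pvLS a b i (j+1)) (pvLS a b (i+1) j))) with _
        rcases le_max_iff.mp h1 with hx | hx
        · omega
        · exact hx
      obtain ⟨t, ht1, ht2, ht3⟩ := ih h1' (by omega)
      exact ⟨t, by omega, ht2, ht3⟩
-- state invariant: s is the least number of leading chars of b containing a
-- length-k common subsequence with a's first i chars (none if impossible)
def pvInv (a b : List Char) (k i : Nat) (s : Option Nat) : Prop :=
  match s with
  | none => ∀ j, j ≤ b.length → pvLS a b i j < k
  | some v => v ≤ b.length ∧ k ≤ pvLS a b i v ∧ ∀ j, j < v → pvLS a b i j < k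
lemma pvStep (a b : List Char) (k i : Nat) (hi : i < a.length) (sp s : Option Nat)
    (hsp : pvInv a b k i sp) (hs : pvInv a b (k+1) i s) :
    pvInv a b (k+1) (i+1) (pvPMin s (pvAdvance b sp (a.getD i ' '))) := by
  set c := a.getD i ' ' with hc
  set f := pvAdvance b sp c with hfdef
  -- each candidate achieves the value
  have hA : ∀ v, s = some v → v ≤ b.length ∧ k + 1 ≤ pvLS a b (i+1) v := by
    intro v hv
    rw [hv] at hs
    exact ⟨hs.1, le_trans hs.2.1 (pvLS_mono a b (by omega) le_rfl)⟩
  have hB : ∀ w, f = some w → w ≤ b.length ∧ k + 1 ≤ pvLS a b (i+1) w := by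
    intro w hw
    cases hsp' : sp with
    | none =>
      rw [hfdef, hsp'] at hw
      simp [pvAdvance] at hw
    | some p =>
      rw [hsp'] at hsp
      obtain ⟨hpm, hkp, _⟩ := hsp
      have hw' : pvAdvance b (some p) c = some w := by rw [← hsp', ← hfdef]; exact hw
      obtain ⟨u, rfl, hpu, hum, hbu, _⟩ := pvAdvance_some b c p w hpm hw'
      refine ⟨by omega, ?_⟩
      rw [pvLS_succ_succ, hbu, if_pos rfl]
      have : k ≤ pvLS a b i u := le_trans hkp (pvLS_mono a b le_rfl hpu)
      omega
  -- lower bound: any j achieving k+1 at i+1 dominates the computed minimum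
  have hL : ∀ j, j ≤ b.length → k + 1 ≤ pvLS a b (i+1) j →
      ∃ w, pvPMin s f = some w ∧ w ≤ j := by
    intro j hjm hj
    by_cases hij : k + 1 ≤ pvLS a b i j
    · -- s itself must be some v ≤ j
      cases hsv : s with
      | none => rw [hsv] at hs; exact absurd hij (by have := hs j hjm; omega)
      | some v =>
        rw [hsv] at hs
        have hvj : v ≤ j := by
          by_contra hlt
          have := hs.2.2 j (by omega)
          omega
        cases hfv : f with
        | none => exact ⟨v, rfl, hvj⟩
        | some w => exact ⟨min v w, rfl, le_trans (min_le_left _ _) hvj⟩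
    · obtain ⟨t, htj, htc, htk⟩ := pvLS_incr a b i k j hj (by omega)
      -- sp must be some p ≤ t, and the first c at ≥ p is at ≤ t
      cases hsp' : sp with
      | none =>
        rw [hsp'] at hsp
        exact absurd htk (by have := hsp t (by omega); omega)
      | some p =>
        rw [hsp'] at hsp
        obtain ⟨hpm, hkp, hmin⟩ := hsp
        have hpt : p ≤ t := by
          by_contra hlt
          have := hmin t (by omega)
          omega
        cases hfv : f with
        | none =>
          have hfv' : pvAdvance b (some p) c = none := by rw [← hsp', ← hfdef]; exact hfv
          exact absurd htc (pvAdvance_none b c p hpm hfv' t hpt (by omega))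
        | some w =>
          have hfv' : pvAdvance b (some p) c = some w := by rw [← hsp', ← hfdef]; exact hfv
          obtain ⟨u, rfl, hpu, hum, hbu, humin⟩ := pvAdvance_some b c p w hpm hfv'
          have hut : u ≤ t := by
            by_contra hlt
            exact humin t hpt (by omega) htc
          have hwj : u + 1 ≤ j := by omega
          cases hsv : s with
          | none => exact ⟨u+1, rfl, hwj⟩
          | some v => exact ⟨min v (u+1), rfl, le_trans (min_le_right _ _) hwj⟩
  -- assemble
  cases hr : pvPMin s f with
  | none =>
    intro j hjm
    by_contra hge
    obtain ⟨w, hw, _⟩ := hL j hjm (by omega)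
    rw [hr] at hw
    exact absurd hw (by simp)
  | some w =>
    have hach : w ≤ b.length ∧ k + 1 ≤ pvLS a b (i+1) w := by
      cases hsv : s with
      | none =>
        cases hfv : f with
        | none => rw [hsv, hfv] at hr; simp [pvPMin] at hr
        | some w' =>
          rw [hsv, hfv] at hr
          simp only [pvPMin, Option.some.injEq] at hr
          exact hr ▸ hB w' hfv
      | some v =>
        cases hfv : f with
        | none =>
          rw [hsv, hfv] at hr
          simp only [pvPMin, Option.some.injEq] at hr
          exact hr ▸ hA v hsv
        | some w' =>
          rw [hsv, hfv] at hr
          simp only [pvPMin, Option.some.injEq] at hr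
          rcases min_cases v w' with ⟨he, _⟩ | ⟨he, _⟩
          · rw [← hr, he]; exact hA v hsv
          · rw [← hr, he]; exact hB w' hfv
    refine ⟨hach.1, hach.2, ?_⟩
    intro j hjw
    by_contra hge
    obtain ⟨w', hw', hwj⟩ := hL j (by omega) (by omega)
    rw [hr] at hw'
    simp only [Option.some.injEq] at hw'
    omega
lemma pvFoldInv (a b : List Char) : ∀ (d i : Nat) (st : Option Nat × Option Nat × Option Nat),
    a.length - i = d → i ≤ a.length →
    pvInv a b 1 i st.1 → pvInv a b 2 i st.2.1 → pvInv a b 3 i st.2.2 →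
    pvInv a b 1 a.length ((a.drop i).foldl (pvStepFn b) st).1 ∧
    pvInv a b 2 a.length ((a.drop i).foldl (pvStepFn b) st).2.1 ∧
    pvInv a b 3 a.length ((a.drop i).foldl (pvStepFn b) st).2.2 := by
  intro d
  induction d with
  | zero =>
    intro i st hd hi h1 h2 h3
    obtain rfl : i = a.length := by omega
    rw [List.drop_length]
    simp only [List.foldl_nil]
    exact ⟨h1, h2, h3⟩
  | succ d ihd =>
    intro i st hd hi h1 h2 h3
    have hlt : i < a.length := by omega
    rw [List.drop_eq_getElem_cons hlt, List.foldl_cons]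
    have hch : a[i] = a.getD i ' ' := by
      rw [List.getD_eq_getElem?_getD, List.getElem?_eq_getElem hlt]
      rfl
    have h0 : pvInv a b 0 i (some 0) :=
      ⟨by omega, by omega, fun j hj => by omega⟩
    refine ihd (i+1) _ (by omega) (by omega) ?_ ?_ ?_
    · have := pvStep a b 0 i hlt (some 0) st.1 h0 h1
      simpa [pvStepFn, hch] using this
    · have := pvStep a b 1 i hlt st.1 st.2.1 h1 h2
      simpa [pvStepFn, hch] using this
    · have := pvStep a b 2 i hlt st.2.1 st.2.2 h2 h3
      simpa [pvStepFn, hch] using this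
lemma pvShares3_eq (a b : List Char) :
    pvShares3 a b = decide (3 ≤ pvLS a b a.length b.length) := by
  unfold pvShares3
  have hnone : ∀ k, 1 ≤ k → pvInv a b k 0 (none : Option Nat) := by
    intro k hk j hj
    simp only [pvLS]
    omega
  have hF := pvFoldInv a b a.length 0 (none, none, none) (by omega) (by omega)
    (hnone 1 (by omega)) (hnone 2 (by omega)) (hnone 3 (by omega))
  rw [List.drop_zero] at hF
  obtain ⟨_, _, h3⟩ := hF
  cases hs : (a.foldl (pvStepFn b) (none, none, none)).2.2 with
  | none =>
    rw [hs] at h3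
    have := h3 b.length le_rfl
    simp [hs, decide_eq_false (by omega : ¬ 3 ≤ pvLS a b a.length b.length)]
  | some v =>
    rw [hs] at h3
    have : 3 ≤ pvLS a b a.length b.length :=
      le_trans h3.2.1 (pvLS_mono a b le_rfl h3.1)
    simp [hs, decide_eq_true this]
lemma pv_prefix_imp (l r : List Char) (h : (3:Int) ≤ common_prefix_len l r) :
    3 ≤ pvLS l r l.length r.length := by
  unfold common_prefix_len at h
  have h3 : 3 ≤ common_prefix_loop l r (min l.length r.length) 0 := by exact_mod_cast h
  obtain ⟨hm, hc⟩ := common_prefix_loop_spec l r (min l.length r.length) 0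
  have hmax : 3 ≤ min l.length r.length := le_trans h3 (hm (by omega))
  have hdg : 3 ≤ pvLS l r 3 3 :=
    pvLS_diag l r 3 (fun k hk => hc k (by omega) (by omega))
  exact le_trans hdg (pvLS_mono l r (by omega) (by omega))
lemma pv_pred_eq (l r : List Char) :
    (decide ((3:Int) ≤ common_prefix_len l r) ||
     decide ((3:Int) ≤ longest_common_subsequence_len l r)) = pvShares3 l r := by
  rw [pvShares3_eq, lcsA_eq]
  by_cases hp : (3:Int) ≤ common_prefix_len l r
  · rw [decide_eq_true hp]
    have := pv_prefix_imp l r hp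
    rw [decide_eq_true this]
    simp
  · rw [decide_eq_false hp]
    simp only [Bool.false_or]
    by_cases hq : 3 ≤ pvLS l r l.length r.length
    · rw [decide_eq_true hq, decide_eq_true (by exact_mod_cast hq : (3:Int) ≤ (pvLS l r l.length r.length : Int))]
    · rw [decide_eq_false hq, decide_eq_false (by exact_mod_cast hq : ¬ (3:Int) ≤ (pvLS l r l.length r.length : Int))]

-- ===== VERDICT (by name: the statement is the Claim_ definition above) =====
theorem has_stem_similarity_spec : Claim_equal_has_stem_similarity := by
  intro canonical candidate _
  unfold Spec_has_stem_similarity has_stem_similarity has_stem_similarity_alt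
  apply PySem.List.any_congr_mem
  intro left _
  apply PySem.List.any_congr_mem
  intro right _
  exact pv_pred_eq left right
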